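-- pv_equiv track=rewrite | github.com/MNico99/Sintaxis-TP01 | GSin.py | A_ParenOpen
-- ===== SOURCE A (Python) =====
-- TRAMPA = -1
--
-- RESULTADO_ACEPTADO = "ACEPTADO"
--
-- RESULTADO_TRAMPA = "TRAMPA"
--
-- RESULTADO_NO_ACEPTADO = "NO_ACEPTADO"
--
-- def d_ParenOpen(estado_anterior, caracter):
--     if estado_anterior == 0 and caracter == "(":
--         return 1
--
--     return TRAMPA
--
-- def A_ParenOpen(cadena):
--     Finales = [1]
--     estado_actual = 0
--
--     for caracter in cadena:
--         estado_proximo = d_ParenOpen(estado_actual, caracter)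
--         if estado_proximo == TRAMPA:
--             return RESULTADO_TRAMPA
--         estado_actual = estado_proximo
--
--     if estado_actual in Finales:
--         return RESULTADO_ACEPTADO
--     else:
--         return RESULTADO_NO_ACEPTADO
-- ===== SOURCE B (Python) =====
-- RESULTADO_ACEPTADO = "ACEPTADO"
-- RESULTADO_TRAMPA = "TRAMPA"
-- RESULTADO_NO_ACEPTADO = "NO_ACEPTADO"
--
-- def A_ParenOpen(cadena):
--     it = iter(cadena)
--     try:
--         primero = next(it)
--     except StopIteration:
--         return RESULTADO_NO_ACEPTADO
--     if primero != "(":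
--         return RESULTADO_TRAMPA
--     try:
--         next(it)
--         return RESULTADO_TRAMPA
--     except StopIteration:
--         return RESULTADO_ACEPTADO
-- ===== Notes on version B (the rewrite author's own statement) =====
-- stated objective: simpler
-- what changed: Replaces the DFA transition-table simulation loop with a direct closed-form check of at most the first two iterator elements (empty input rejected, wrong first character or any second character trapped, otherwise accepted).
import Mathlib
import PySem

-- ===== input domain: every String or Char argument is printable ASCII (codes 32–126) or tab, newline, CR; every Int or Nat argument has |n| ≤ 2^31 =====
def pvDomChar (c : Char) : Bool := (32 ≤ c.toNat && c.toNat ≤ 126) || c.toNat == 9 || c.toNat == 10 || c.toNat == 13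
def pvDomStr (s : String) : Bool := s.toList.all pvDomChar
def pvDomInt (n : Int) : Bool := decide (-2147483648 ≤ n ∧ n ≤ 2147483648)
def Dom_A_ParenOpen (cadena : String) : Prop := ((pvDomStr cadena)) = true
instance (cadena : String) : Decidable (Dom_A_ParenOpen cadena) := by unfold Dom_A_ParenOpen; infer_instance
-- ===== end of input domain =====

-- B replaces the DFA loop with a direct check of the first two characters; equal outputs, simpler shape.

-- ===== PORT A =====
def pvTRAMPA : Int := -1

def d_ParenOpen (estado_anterior : Int) (caracter : Char) : Int :=
  if estado_anterior = 0 ∧ caracter = '(' then 1 else pvTRAMPA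

-- the for-loop of A: early return TRAMPA, else threaded state
def A_ParenOpen_loop (chars : List Char) (estado_actual : Int) : Option Int :=
  match chars with
  | [] => some estado_actual
  | c :: rest =>
    let estado_proximo := d_ParenOpen estado_actual c
    if estado_proximo = pvTRAMPA then none
    else A_ParenOpen_loop rest estado_proximo

def A_ParenOpen (cadena : String) : String :=
  match A_ParenOpen_loop cadena.toList 0 with
  | none => "TRAMPA"
  | some estado_actual =>
    if estado_actual ∈ [(1 : Int)] then "ACEPTADO" else "NO_ACEPTADO"

-- ===== PORT B =====
def A_ParenOpen_alt (cadena : String) : String :=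
  match cadena.toList with
  | [] => "NO_ACEPTADO"                         -- next(it) raises immediately
  | primero :: rest =>
    if primero ≠ '(' then "TRAMPA"
    else match rest with
      | [] => "ACEPTADO"                        -- second next(it) raises
      | _ :: _ => "TRAMPA"

-- ===== PRECONDITION & SPEC =====
def Spec_A_ParenOpen (cadena : String) (out : String) : Prop := out = A_ParenOpen_alt cadena
instance (cadena : String) (out : String) : Decidable (Spec_A_ParenOpen cadena out) := by unfold Spec_A_ParenOpen; infer_instance

-- ===== CLAIM (what is proved, stated in full; the proofs are below) =====
def Claim_equal_A_ParenOpen : Prop := ∀ (cadena : String), Dom_A_ParenOpen cadena → Spec_A_ParenOpen cadena (A_ParenOpen cadena)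

-- ===== LEMMAS AND PROOFS =====

theorem A_ParenOpen_eq (cadena : String) : A_ParenOpen cadena = A_ParenOpen_alt cadena := by
  unfold A_ParenOpen A_ParenOpen_alt
  match h : cadena.toList with
  | [] => simp [A_ParenOpen_loop]
  | c :: rest =>
    by_cases hc : c = '('
    · subst hc
      match rest with
      | [] => simp [A_ParenOpen_loop, d_ParenOpen, pvTRAMPA]
      | c2 :: rest2 =>
        simp [A_ParenOpen_loop, d_ParenOpen, pvTRAMPA]
    · simp [A_ParenOpen_loop, d_ParenOpen, pvTRAMPA, hc]

-- ===== VERDICT (by name: the statement is the Claim_ definition above) =====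
theorem A_ParenOpen_spec : Claim_equal_A_ParenOpen := by
  intro cadena _
  exact A_ParenOpen_eq cadena
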